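-- pv_equiv track=rewrite | github.com/rakibul56/Pygraft-Supply-Chain-KGs-Generator | pygraft/core/utils_schema.py | _build_layer_map
-- ===== SOURCE A (Python) =====
-- from collections import defaultdict, deque
--
-- def _build_layer_map(direct_super):
--     children = defaultdict(list)
--     for child, parent in direct_super.items():
--         if parent != "owl:Thing":
--             children[parent].append(child)
--     layer2classes = defaultdict(list)
--     queue = deque()
--     roots = sorted([cls for cls, parent in direct_super.items() if parent == "owl:Thing"])
--     for root in roots:
--         queue.append((root, 1))
--     seen = set()
--     while queue:
--         cls, layer = queue.popleft()
--         if cls in seen: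
--             continue
--         seen.add(cls)
--         layer2classes[layer].append(cls)
--         for child in sorted(children.get(cls, [])):
--             queue.append((child, layer + 1))
--     return {layer: sorted(values) for layer, values in layer2classes.items()}
-- ===== SOURCE B (Python) =====
-- def _build_layer_map(direct_super):
--     # Walk each class's parent chain upward instead of BFS from the roots:
--     # layer(c) = number of steps until a parent equal to "owl:Thing".
--     # A chain that ever reaches "owl:Thing" visits distinct classes, so it
--     # does so within len(direct_super) steps; longer walks are cycles/dangling
--     # chains and yield None (the class is left out, as the BFS never reaches it).
--     n = len(direct_super)
--     def layer_of(cls):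
--         d = 1
--         for _ in range(n + 1):
--             parent = direct_super.get(cls)
--             if parent == "owl:Thing":
--                 return d
--             if parent is None:
--                 return None
--             cls = parent
--             d += 1
--         return None
--     layers = sorted({d for c in direct_super if (d := layer_of(c)) is not None})
--     return {d: sorted(c for c in direct_super if layer_of(c) == d) for d in layers}
-- ===== Notes on version B (the rewrite author's own statement) =====
-- stated objective: simpler
-- what changed: Replaces A's children-map construction plus BFS queue with per-class upward parent-chain walks: each key's layer is the number of .get steps until the parent is 'owl:Thing' (bounded by len(direct_super)+1 so cycles/dangling chains drop out with None), then keys are bucketed by layer and each layer sorted.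
import Mathlib
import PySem

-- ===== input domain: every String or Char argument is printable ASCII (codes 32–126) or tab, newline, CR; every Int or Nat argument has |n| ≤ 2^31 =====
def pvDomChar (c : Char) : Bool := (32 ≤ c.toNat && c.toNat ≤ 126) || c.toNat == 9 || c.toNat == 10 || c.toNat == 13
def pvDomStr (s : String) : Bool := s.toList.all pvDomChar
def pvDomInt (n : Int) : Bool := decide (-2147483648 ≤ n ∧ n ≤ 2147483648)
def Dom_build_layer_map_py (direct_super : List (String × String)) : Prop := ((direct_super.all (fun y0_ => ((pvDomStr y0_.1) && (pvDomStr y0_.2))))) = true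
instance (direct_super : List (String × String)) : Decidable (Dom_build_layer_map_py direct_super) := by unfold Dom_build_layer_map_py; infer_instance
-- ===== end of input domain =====

-- B replaces A's children-map + BFS queue by an upward parent-chain walk per class
-- (depth = steps until "owl:Thing", bounded by len(direct_super)+1, so cycles and
-- dangling chains drop out); same exact result, no speed claim.

-- ===== PORT A =====
-- children = defaultdict(list); for child, parent in direct_super.items(): if parent != "owl:Thing": children[parent].append(child)
def childrenOfA (direct_super : List (String × String)) : PySem.Dict String (List String) :=
  direct_super.foldl
    (fun d cp => if cp.2 ≠ "owl:Thing" then d.modify cp.2 [] (fun v => v ++ [cp.1]) else d)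
    PySem.Dict.empty

-- roots = sorted([cls for cls, parent in direct_super.items() if parent == "owl:Thing"])
def rootsA (direct_super : List (String × String)) : List String :=
  PySem.List.sorted ((direct_super.filter (fun cp => cp.2 == "owl:Thing")).map (fun cp => cp.1)) (fun x => x)

-- the 'while queue:' loop; fuel (2*len+1, always sufficient) only makes the recursion structural
def bfsA (children : PySem.Dict String (List String)) :
    Nat → List (String × Int) → PySem.Set String → PySem.Dict Int (List String) →
    PySem.Dict Int (List String)
  | _, [], _, l2c => l2c
  | 0, _ :: _, _, l2c => l2c
  | fuel+1, (cls, layer) :: rest, seen, l2c =>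
    if seen.contains cls then bfsA children fuel rest seen l2c
    else
      bfsA children fuel
        (rest ++ (PySem.List.sorted (children.getD cls []) (fun x => x)).map (fun ch => (ch, layer + 1)))
        (seen.add cls)
        (l2c.modify layer [] (fun v => v ++ [cls]))

def build_layer_map_py (direct_super : List (String × String)) : List (Int × List String) :=
  (bfsA (childrenOfA direct_super) (2 * direct_super.length + 1)
      ((rootsA direct_super).map (fun r => (r, (1 : Int)))) PySem.Set.empty PySem.Dict.empty).items.map
    (fun p => (p.1, PySem.List.sorted p.2 (fun x => x)))

-- ===== PORT B =====
-- direct_super.get(cls): first (= only) match in the association list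
def altGet (direct_super : List (String × String)) (cls : String) : Option String :=
  (direct_super.find? (fun p => p.1 == cls)).map (fun p => p.2)

-- the 'for _ in range(n + 1)' upward walk of layer_of
def altLayerOf (direct_super : List (String × String)) : Nat → String → Int → Option Int
  | 0, _, _ => none
  | fuel+1, cls, d =>
    match altGet direct_super cls with
    | some parent => if parent = "owl:Thing" then some d else altLayerOf direct_super fuel parent (d + 1)
    | none => none

def build_layer_map_py_alt (direct_super : List (String × String)) : List (Int × List String) :=
  let n := direct_super.length
  let layerOf := fun c => altLayerOf direct_super (n + 1) c 1
  let keys := direct_super.map (fun p => p.1)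
  let layers := PySem.List.sorted (PySem.Set.ofList (keys.filterMap layerOf)) (fun x => x)
  layers.map (fun d => (d, PySem.List.sorted (keys.filter (fun c => layerOf c == some d)) (fun x => x)))

-- ===== PRECONDITION & SPEC =====
-- Pre_: the association list encodes a Python dict, so its keys are distinct; a
-- duplicate-key list is not the encoding of any dict input the Python functions can receive.
def Pre_build_layer_map_py (direct_super : List (String × String)) : Prop :=
  (direct_super.map (fun p => p.1)).Nodup
instance (direct_super : List (String × String)) : Decidable (Pre_build_layer_map_py direct_super) := by unfold Pre_build_layer_map_py; infer_instance

def pvWitness_build_layer_map_py : (List (String × String)) :=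
  [("A", "owl:Thing"), ("B", "A"), ("C", "A")]

def Spec_build_layer_map_py (direct_super : List (String × String)) (out : List (Int × List String)) : Prop := out = build_layer_map_py_alt direct_super
instance (direct_super : List (String × String)) (out : List (Int × List String)) : Decidable (Spec_build_layer_map_py direct_super out) := by unfold Spec_build_layer_map_py; infer_instance

-- ===== CLAIM (what is proved, stated in full; the proofs are below) =====
def Claim_equal_build_layer_map_py : Prop := ∀ (direct_super : List (String × String)), Dom_build_layer_map_py direct_super → Pre_build_layer_map_py direct_super → Spec_build_layer_map_py direct_super (build_layer_map_py direct_super)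

-- ===== LEMMAS AND PROOFS =====

-- proof-side abbreviations
def pvKeys (ds : List (String × String)) : List String := ds.map (fun p => p.1)

def pvD (ds : List (String × String)) (c : String) : Option Int :=
  altLayerOf ds (ds.length + 1) c 1

def pvLvl (ds : List (String × String)) (l : Int) : List String :=
  (pvKeys ds).filter (fun c => pvD ds c == some l)

def pvSB (ds : List (String × String)) (c : String) : List String :=
  PySem.List.sorted ((childrenOfA ds).getD c []) (fun x => x)

-- the upward chain from c (list of visited classes, ending just below "owl:Thing")
def pvChain (ds : List (String × String)) : Nat → String → Option (List String)
  | 0, _ => none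
  | f+1, c =>
    match altGet ds c with
    | some p => if p = "owl:Thing" then some [c] else (pvChain ds f p).map (fun L => c :: L)
    | none => none

def pvFuture (ds : List (String × String)) : Nat → List String → List (List String)
  | 0, _ => []
  | g+1, F => if F = [] then [] else F :: pvFuture ds g (F.flatMap (pvSB ds))

def pvGroups : PySem.Dict Int (List String) → Int → List (List String) → PySem.Dict Int (List String)
  | acc, _, [] => acc
  | acc, l, F :: Fs => pvGroups (F.foldl (fun d c => d.modify l [] (fun v => v ++ [c])) acc) (l+1) Fs

def pvLevelItems : Int → List (List String) → List (Int × List String)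
  | _, [] => []
  | l, F :: Fs => (l, F) :: pvLevelItems (l+1) Fs

theorem pv_nodup_sub_len (l1 l2 : List String) (h : l1.Nodup) (hs : l1 ⊆ l2) :
    l1.length ≤ l2.length := by
  classical
  calc l1.length = l1.toFinset.card := (List.toFinset_card_of_nodup h).symm
  _ ≤ l2.toFinset.card := Finset.card_le_card (by intro x hx; simp only [List.mem_toFinset] at *; exact hs hx)
  _ ≤ l2.length := l2.toFinset_card_le

theorem pv_g_mem (ds : List (String × String)) (c p : String)
    (h : altGet ds c = some p) : (c, p) ∈ ds := by
  unfold altGet at h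
  cases hf : ds.find? (fun p => p.1 == c) with
  | none => simp [hf] at h
  | some q =>
    simp only [hf, Option.map_some, Option.some.injEq] at h
    have hq := List.find?_some hf
    have hm := List.mem_of_find?_eq_some hf
    simp only [beq_iff_eq] at hq
    have : q = (c, p) := by cases q; simp_all
    rwa [this] at hm


theorem pv_g_mem_keys (ds : List (String × String)) (c p : String)
    (h : altGet ds c = some p) : c ∈ pvKeys ds := by
  have := pv_g_mem ds c p h
  exact List.mem_map.mpr ⟨(c, p), this, rfl⟩


theorem pv_g_uniq (ds : List (String × String)) (hnd : (pvKeys ds).Nodup) (c p : String)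
    (h : (c, p) ∈ ds) : altGet ds c = some p := by
  induction ds with
  | nil => simp at h
  | cons q t ih =>
    simp only [pvKeys, List.map_cons, List.nodup_cons] at hnd
    rcases List.mem_cons.mp h with h0 | h1
    · subst h0; simp [altGet]
    · have hne : (q.1 == c) = false := by
        refine beq_eq_false_iff_ne.mpr ?_
        intro he
        exact hnd.1 (he ▸ List.mem_map.mpr ⟨(c, p), h1, rfl⟩)
      have h2 := ih hnd.2 h1
      unfold altGet at h2 ⊢
      rw [List.find?_cons, hne]
      exact h2


theorem pv_chain_head (ds : List (String × String)) (f : Nat) (c : String) (L : List String)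
    (h : pvChain ds f c = some L) : ∃ T, L = c :: T := by
  cases f with
  | zero => simp [pvChain] at h
  | succ g =>
    unfold pvChain at h
    cases hg : altGet ds c with
    | none => simp [hg] at h
    | some p =>
      simp only [hg] at h
      by_cases hp : p = "owl:Thing"
      · simp [hp] at h
        exact ⟨[], h.symm⟩
      · simp only [if_neg hp] at h
        cases hc : pvChain ds g p with
        | none => simp [hc] at h
        | some T => simp only [hc, Option.map_some, Option.some.injEq] at h; exact ⟨T, h.symm⟩


theorem pv_chain_fuel (ds : List (String × String)) (f : Nat) (c : String) (L : List String)
    (h : pvChain ds f c = some L) :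
    L.length ≤ f ∧ ∀ f', L.length ≤ f' → pvChain ds f' c = some L := by
  induction f generalizing c L with
  | zero => simp [pvChain] at h
  | succ g ih =>
    unfold pvChain at h
    cases hg : altGet ds c with
    | none => simp [hg] at h
    | some p =>
      simp only [hg] at h
      by_cases hp : p = "owl:Thing"
      · simp [hp] at h
        subst h
        refine ⟨by simp, ?_⟩
        intro f' hf'
        match f', hf' with
        | f'' + 1, _ => unfold pvChain; simp [hg, hp]
      · simp only [if_neg hp] at h
        cases hc : pvChain ds g p with
        | none => simp [hc] at h
        | some T =>
          simp only [hc, Option.map_some, Option.some.injEq] at h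
          subst h
          obtain ⟨hle, hall⟩ := ih p T hc
          refine ⟨by simpa using Nat.succ_le_succ hle, ?_⟩
          intro f' hf'
          match f', hf' with
          | f'' + 1, hf' =>
            have : T.length ≤ f'' := by simpa using Nat.lt_succ_iff.mp (Nat.lt_of_lt_of_le (Nat.lt_succ_of_le le_rfl) hf')
            unfold pvChain
            simp [hg, hp, hall f'' (by omega)]


theorem pv_chain_uniq (ds : List (String × String)) (f f' : Nat) (c : String) (L L' : List String)
    (h : pvChain ds f c = some L) (h' : pvChain ds f' c = some L') : L = L' := by
  induction f generalizing f' c L L' with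
  | zero => simp [pvChain] at h
  | succ g ih =>
    cases f' with
    | zero => simp [pvChain] at h'
    | succ g' =>
      unfold pvChain at h h'
      cases hg : altGet ds c with
      | none => simp [hg] at h
      | some p =>
        simp only [hg] at h h'
        by_cases hp : p = "owl:Thing"
        · simp [hp] at h h'
          rw [← h, ← h']
        · simp only [if_neg hp] at h h'
          cases hc : pvChain ds g p with
          | none => simp [hc] at h
          | some T =>
            cases hc' : pvChain ds g' p with
            | none => simp [hc'] at h'
            | some T' =>
              simp only [hc, hc', Option.map_some, Option.some.injEq] at h h'
              have := ih g' p T T' hc hc'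
              rw [← h, ← h', this]


theorem pv_chain_mem (ds : List (String × String)) (f : Nat) (c : String) (L : List String)
    (h : pvChain ds f c = some L) :
    ∀ x ∈ L, ∃ g M, pvChain ds g x = some M ∧ M.length ≤ L.length := by
  induction f generalizing c L with
  | zero => simp [pvChain] at h
  | succ g ih =>
    unfold pvChain at h
    cases hg : altGet ds c with
    | none => simp [hg] at h
    | some p =>
      simp only [hg] at h
      by_cases hp : p = "owl:Thing"
      · simp [hp] at h
        subst h
        intro x hx
        simp only [List.mem_singleton] at hx
        subst hx
        exact ⟨g + 1, [x], by unfold pvChain; simp [hg, hp], le_rfl⟩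
      · simp only [if_neg hp] at h
        cases hc : pvChain ds g p with
        | none => simp [hc] at h
        | some T =>
          simp only [hc, Option.map_some, Option.some.injEq] at h
          subst h
          intro x hx
          rcases List.mem_cons.mp hx with rfl | hxT
          · exact ⟨g + 1, x :: T, by unfold pvChain; simp [hg, hp, hc], le_rfl⟩
          · obtain ⟨g', M, hM, hlen⟩ := ih p T hc x hxT
            exact ⟨g', M, hM, by simpa using Nat.le_succ_of_le hlen⟩


theorem pv_chain_keys (ds : List (String × String)) (f : Nat) (c : String) (L : List String)
    (h : pvChain ds f c = some L) : ∀ x ∈ L, x ∈ pvKeys ds := by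
  intro x hx
  obtain ⟨g, M, hM, _⟩ := pv_chain_mem ds f c L h x hx
  obtain ⟨T, rfl⟩ := pv_chain_head ds g x M hM
  cases g with
  | zero => simp [pvChain] at hM
  | succ g' =>
    unfold pvChain at hM
    cases hg : altGet ds x with
    | none => simp [hg] at hM
    | some p => exact pv_g_mem_keys ds x p hg


theorem pv_chain_nodup (ds : List (String × String)) (f : Nat) (c : String) (L : List String)
    (h : pvChain ds f c = some L) : L.Nodup := by
  induction f generalizing c L with
  | zero => simp [pvChain] at h
  | succ g ih =>
    unfold pvChain at h
    cases hg : altGet ds c with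
    | none => simp [hg] at h
    | some p =>
      simp only [hg] at h
      by_cases hp : p = "owl:Thing"
      · simp [hp] at h
        subst h; simp
      · simp only [if_neg hp] at h
        cases hc : pvChain ds g p with
        | none => simp [hc] at h
        | some T =>
          simp only [hc, Option.map_some, Option.some.injEq] at h
          subst h
          refine List.nodup_cons.mpr ⟨?_, ih p T hc⟩
          intro hcT
          obtain ⟨g', M, hM, hlen⟩ := pv_chain_mem ds g p T hc c hcT
          have hfull : pvChain ds (g + 1) c = some (c :: T) := by
            unfold pvChain; simp [hg, hp, hc]
          have := pv_chain_uniq ds g' (g + 1) c M (c :: T) hM hfull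
          subst this
          simp at hlen


theorem pv_chain_len_le (ds : List (String × String)) (f : Nat) (c : String) (L : List String)
    (h : pvChain ds f c = some L) : L.length ≤ ds.length := by
  have hk := pv_chain_keys ds f c L h
  have hn := pv_chain_nodup ds f c L h
  have : (pvKeys ds).length = ds.length := by simp [pvKeys]
  rw [← this]
  exact pv_nodup_sub_len L (pvKeys ds) hn hk


theorem pv_alt_eq_chain (ds : List (String × String)) (f : Nat) (c : String) (d : Int) :
    altLayerOf ds f c d = (pvChain ds f c).map (fun L => d + (L.length : Int) - 1) := by
  induction f generalizing c d with
  | zero => simp [altLayerOf, pvChain]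
  | succ g ih =>
    unfold altLayerOf pvChain
    cases hg : altGet ds c with
    | none => simp
    | some p =>
      by_cases hp : p = "owl:Thing"
      · subst hp
        simp
        try omega
      · simp only [if_neg hp]
        rw [ih]
        cases hc : pvChain ds g p with
        | none => simp
        | some T => simp; omega


theorem pv_d_eq (ds : List (String × String)) (c : String) :
    pvD ds c = (pvChain ds (ds.length + 1) c).map (fun L => (L.length : Int)) := by
  unfold pvD
  rw [pv_alt_eq_chain]
  cases pvChain ds (ds.length + 1) c with
  | none => simp
  | some L => simp


theorem pv_d_pos (ds : List (String × String)) (c : String) (v : Int)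
    (h : pvD ds c = some v) : 1 ≤ v := by
  rw [pv_d_eq] at h
  cases hc : pvChain ds (ds.length + 1) c with
  | none => simp [hc] at h
  | some L =>
    simp only [hc, Option.map_some, Option.some.injEq] at h
    obtain ⟨T, rfl⟩ := pv_chain_head ds _ c L hc
    simp at h
    omega


theorem pv_d_le (ds : List (String × String)) (c : String) (v : Int)
    (h : pvD ds c = some v) : v ≤ (ds.length : Int) := by
  rw [pv_d_eq] at h
  cases hc : pvChain ds (ds.length + 1) c with
  | none => simp [hc] at h
  | some L =>
    simp only [hc, Option.map_some, Option.some.injEq] at h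
    have := pv_chain_len_le ds _ c L hc
    omega


theorem pv_d_keys (ds : List (String × String)) (c : String) (v : Int)
    (h : pvD ds c = some v) : c ∈ pvKeys ds := by
  rw [pv_d_eq] at h
  cases hc : pvChain ds (ds.length + 1) c with
  | none => simp [hc] at h
  | some L =>
    obtain ⟨T, rfl⟩ := pv_chain_head ds _ c L hc
    exact pv_chain_keys ds _ c _ hc c (by simp)


theorem pv_d_one (ds : List (String × String)) (c : String) :
    pvD ds c = some 1 ↔ altGet ds c = some "owl:Thing" := by
  constructor
  · intro h
    rw [pv_d_eq] at h
    cases hc : pvChain ds (ds.length + 1) c with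
    | none => simp [hc] at h
    | some L =>
      simp only [hc, Option.map_some, Option.some.injEq] at h
      obtain ⟨T, rfl⟩ := pv_chain_head ds _ c L hc
      have hT : T = [] := by
        cases T with
        | nil => rfl
        | cons y ys => simp at h; omega
      subst hT
      unfold pvChain at hc
      cases hg : altGet ds c with
      | none => simp [hg] at hc
      | some p =>
        simp only [hg] at hc
        by_cases hp : p = "owl:Thing"
        · rw [hp]
        · simp only [if_neg hp] at hc
          cases hc2 : pvChain ds ds.length p with
          | none => simp [hc2] at hc
          | some M =>
            simp [hc2] at hc
            obtain ⟨T2, rfl⟩ := pv_chain_head ds _ p M hc2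
            simp at hc
  · intro h
    rw [pv_d_eq]
    have : pvChain ds (ds.length + 1) c = some [c] := by
      unfold pvChain
      simp [h]
    simp [this]


theorem pv_d_succ (ds : List (String × String)) (c : String) (v : Int) :
    (pvD ds c = some v ∧ v ≠ 1) ↔
      (∃ p, altGet ds c = some p ∧ p ≠ "owl:Thing" ∧ pvD ds p = some (v - 1)) := by
  constructor
  · rintro ⟨h, hv⟩
    rw [pv_d_eq] at h
    cases hc : pvChain ds (ds.length + 1) c with
    | none => simp [hc] at h
    | some L =>
      simp only [hc, Option.map_some, Option.some.injEq] at h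
      obtain ⟨T, rfl⟩ := pv_chain_head ds _ c L hc
      unfold pvChain at hc
      cases hg : altGet ds c with
      | none => simp [hg] at hc
      | some p =>
        simp only [hg] at hc
        by_cases hp : p = "owl:Thing"
        · simp [hp] at hc
          subst hc
          simp at h
          omega
        · simp only [if_neg hp] at hc
          cases hc2 : pvChain ds ds.length p with
          | none => simp [hc2] at hc
          | some M =>
            simp [hc2] at hc
            subst hc
            refine ⟨p, rfl, hp, ?_⟩
            rw [pv_d_eq]
            have hMlen : M.length ≤ ds.length := pv_chain_len_le ds _ p M hc2
            have hfull : pvChain ds (ds.length + 1) p = some M :=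
              (pv_chain_fuel ds _ p M hc2).2 (ds.length + 1) (by omega)
            rw [hfull]
            simp only [Option.map_some, Option.some.injEq, List.length_cons] at h ⊢
            push_cast at h ⊢
            omega
  · rintro ⟨p, hg, hp, hpd⟩
    rw [pv_d_eq] at hpd ⊢
    cases hc2 : pvChain ds (ds.length + 1) p with
    | none => simp [hc2] at hpd
    | some M =>
      simp only [hc2, Option.map_some, Option.some.injEq] at hpd
      have hMlen : M.length ≤ ds.length := pv_chain_len_le ds _ p M hc2
      have hMn : pvChain ds ds.length p = some M :=
        (pv_chain_fuel ds _ p M hc2).2 ds.length (by omega)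
      have hcc : pvChain ds (ds.length + 1) c = some (c :: M) := by
        unfold pvChain
        simp [hg, hp, hMn]
      rw [hcc]
      have hpos : 1 ≤ M.length := by
        obtain ⟨T, rfl⟩ := pv_chain_head ds _ p M hc2
        simp
      constructor
      · simp only [Option.map_some, Option.some.injEq, List.length_cons]
        push_cast
        omega
      · omega


theorem pv_mem_lvl (ds : List (String × String)) (l : Int) (x : String) :
    x ∈ pvLvl ds l ↔ pvD ds x = some l := by
  unfold pvLvl
  rw [List.mem_filter]
  constructor
  · rintro ⟨_, h2⟩
    exact beq_iff_eq.mp h2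
  · intro h
    refine ⟨?_, beq_iff_eq.mpr h⟩
    obtain ⟨v, hv⟩ : ∃ v, pvD ds x = some v := ⟨l, h⟩
    exact pv_d_keys ds x v hv


theorem pv_lvl_nodup (ds : List (String × String)) (hnd : (pvKeys ds).Nodup) (l : Int) :
    (pvLvl ds l).Nodup := by
  exact hnd.filter _


theorem pv_chr (ds : List (String × String)) (acc : PySem.Dict String (List String)) (c : String) :
    ((ds.foldl (fun d cp => if cp.2 ≠ "owl:Thing" then d.modify cp.2 [] (fun v => v ++ [cp.1]) else d) acc)).getD c []
      = acc.getD c [] ++ (if c = "owl:Thing" then [] else (ds.filter (fun cp => cp.2 == c)).map (fun cp => cp.1)) := by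
  induction ds generalizing acc with
  | nil => simp [List.foldl]
  | cons cp t ih =>
    simp only [List.foldl_cons]
    by_cases hcp : cp.2 = "owl:Thing"
    · rw [if_neg (by simp [hcp])]
      rw [ih acc]
      by_cases hc : c = "owl:Thing"
      · simp [hc]
      · simp only [if_neg hc, List.filter_cons]
        have : (cp.2 == c) = false := by
          refine beq_eq_false_iff_ne.mpr ?_
          rw [hcp]; intro he; exact hc he.symm
        simp [this]
    · rw [if_pos (by simp [hcp])]
      rw [ih]
      rw [PySem.Dict.getD_modify]
      by_cases hc : c = cp.2
      · subst hc
        simp only [if_pos rfl, if_neg hcp, List.filter_cons]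
        simp [List.append_assoc]
      · simp only [if_neg hc]
        by_cases hct : c = "owl:Thing"
        · simp [hct]
        · simp only [if_neg hct, List.filter_cons]
          have : (cp.2 == c) = false := by
            refine beq_eq_false_iff_ne.mpr ?_
            intro he; exact hc he.symm
          simp [this]


theorem pv_mem_sb (ds : List (String × String)) (c x : String) :
    x ∈ pvSB ds c ↔ ((x, c) ∈ ds ∧ c ≠ "owl:Thing") := by
  unfold pvSB
  rw [PySem.List.mem_sorted]
  have hchr := pv_chr ds PySem.Dict.empty c
  unfold childrenOfA
  rw [hchr]
  by_cases hc : c = "owl:Thing"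
  · simp [hc, PySem.Dict.getD_empty]
  · simp only [if_neg hc, PySem.Dict.getD_empty, List.nil_append, List.mem_map]
    constructor
    · rintro ⟨cp, hcp, rfl⟩
      rw [List.mem_filter] at hcp
      have : cp.2 = c := beq_iff_eq.mp hcp.2
      refine ⟨?_, hc⟩
      have : cp = (cp.1, c) := by rw [← this]
      rw [← this]
      exact hcp.1
    · rintro ⟨hm, _⟩
      exact ⟨(x, c), List.mem_filter.mpr ⟨hm, by simp⟩, rfl⟩


theorem pv_sb_nodup (ds : List (String × String)) (hnd : (pvKeys ds).Nodup) (c : String) :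
    (pvSB ds c).Nodup := by
  unfold pvSB
  refine (PySem.List.sorted_perm _ _ _).nodup_iff.mpr ?_
  have hchr := pv_chr ds PySem.Dict.empty c
  unfold childrenOfA
  rw [hchr]
  by_cases hc : c = "owl:Thing"
  · simp [hc, PySem.Dict.getD_empty]
  · simp only [if_neg hc, PySem.Dict.getD_empty, List.nil_append]
    have hsub : ((ds.filter (fun cp => cp.2 == c)).map (fun cp => cp.1)).Sublist (pvKeys ds) :=
      List.Sublist.map _ List.filter_sublist
    exact hnd.sublist hsub


theorem pv_sb_parent (ds : List (String × String)) (hnd : (pvKeys ds).Nodup) (c x : String)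
    (h : x ∈ pvSB ds c) : altGet ds x = some c ∧ c ≠ "owl:Thing" := by
  obtain ⟨hm, hc⟩ := (pv_mem_sb ds c x).mp h
  exact ⟨pv_g_uniq ds hnd x c hm, hc⟩


theorem pv_sb_d (ds : List (String × String)) (hnd : (pvKeys ds).Nodup) (c x : String) (l : Int)
    (hc : pvD ds c = some l) (h : x ∈ pvSB ds c) : pvD ds x = some (l + 1) := by
  obtain ⟨hg, hcth⟩ := pv_sb_parent ds hnd c x h
  have := (pv_d_succ ds x (l + 1)).mpr ⟨c, hg, hcth, by simpa using hc⟩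
  exact this.1


theorem pv_lvl_empty_ge (ds : List (String × String)) (l : Int) (h1 : 1 ≤ l)
    (h : pvLvl ds l = []) : ∀ d, l ≤ d → pvLvl ds d = [] := by
  intro d hd
  induction d, hd using Int.le_induction with
  | base =>
    exact h
  | succ m hm ihm =>
    have hLm : pvLvl ds m = [] := ihm
    rw [List.eq_nil_iff_forall_not_mem]
    intro x hx
    have hxd := (pv_mem_lvl ds (m + 1) x).mp hx
    have hne1 : (m + 1 : Int) ≠ 1 := by omega
    obtain ⟨p, _, _, hpd⟩ := (pv_d_succ ds x (m + 1)).mp ⟨hxd, hne1⟩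
    have : p ∈ pvLvl ds m := (pv_mem_lvl ds m p).mpr (by simpa using hpd)
    rw [hLm] at this
    simp at this


theorem pv_flat_nodup (ds : List (String × String)) (hnd : (pvKeys ds).Nodup)
    (F : List String) (hF : F.Nodup) : (F.flatMap (pvSB ds)).Nodup := by
  induction F with
  | nil => simp
  | cons a t ih =>
    simp only [List.flatMap_cons]
    rw [List.nodup_append]
    rcases List.nodup_cons.mp hF with ⟨hna, hnt⟩
    refine ⟨pv_sb_nodup ds hnd a, ih hnt, ?_⟩
    intro y hy1 z hz
    rintro rfl
    obtain ⟨q, hq, hyq⟩ := List.mem_flatMap.mp hz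
    have h1 := (pv_sb_parent ds hnd a y hy1).1
    have h2 := (pv_sb_parent ds hnd q y hyq).1
    rw [h1] at h2
    have : a = q := by simpa using h2
    exact hna (this ▸ hq)


theorem pv_lvl_succ (ds : List (String × String)) (hnd : (pvKeys ds).Nodup) (l : Int)
    (h1 : 1 ≤ l) (x : String) :
    x ∈ pvLvl ds (l + 1) ↔ ∃ p ∈ pvLvl ds l, x ∈ pvSB ds p := by
  constructor
  · intro hx
    have hxd := (pv_mem_lvl ds (l + 1) x).mp hx
    obtain ⟨p, hg, hp, hpd⟩ := (pv_d_succ ds x (l + 1)).mp ⟨hxd, by omega⟩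
    refine ⟨p, (pv_mem_lvl ds l p).mpr (by simpa using hpd), ?_⟩
    exact (pv_mem_sb ds p x).mpr ⟨pv_g_mem ds x p hg, hp⟩
  · rintro ⟨p, hpl, hxp⟩
    have hpd := (pv_mem_lvl ds l p).mp hpl
    exact (pv_mem_lvl ds (l + 1) x).mpr (pv_sb_d ds hnd p x l hpd hxp)


theorem pv_roots_mem (ds : List (String × String)) (hnd : (pvKeys ds).Nodup) (x : String) :
    x ∈ rootsA ds ↔ altGet ds x = some "owl:Thing" := by
  unfold rootsA
  rw [PySem.List.mem_sorted, List.mem_map]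
  constructor
  · rintro ⟨cp, hcp, rfl⟩
    rw [List.mem_filter] at hcp
    have h2 : cp.2 = "owl:Thing" := beq_iff_eq.mp hcp.2
    have : cp = (cp.1, "owl:Thing") := by rw [← h2]
    exact pv_g_uniq ds hnd cp.1 "owl:Thing" (this ▸ hcp.1)
  · intro h
    exact ⟨(x, "owl:Thing"), List.mem_filter.mpr ⟨pv_g_mem ds x _ h, by simp⟩, rfl⟩


theorem pv_roots_nodup (ds : List (String × String)) (hnd : (pvKeys ds).Nodup) :
    (rootsA ds).Nodup := by
  unfold rootsA
  refine (PySem.List.sorted_perm _ _ _).nodup_iff.mpr ?_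
  have hsub : ((ds.filter (fun cp => cp.2 == "owl:Thing")).map (fun cp => cp.1)).Sublist (pvKeys ds) :=
    List.Sublist.map _ List.filter_sublist
  exact hnd.sublist hsub


theorem pv_roots_lvl (ds : List (String × String)) (hnd : (pvKeys ds).Nodup) (x : String) :
    x ∈ rootsA ds ↔ x ∈ pvLvl ds 1 := by
  rw [pv_roots_mem ds hnd, pv_mem_lvl, pv_d_one]


theorem pv_set_contains_iff (s : PySem.Set String) (x : String) :
    s.contains x = true ↔ x ∈ s := by
  unfold PySem.Set.contains
  exact List.contains_iff_mem


theorem pv_filt_count (l : List String) (p q : String → Bool) (a : String)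
    (hnd : l.Nodup) (ha : a ∈ l) (hp : p a = true)
    (hq : ∀ x, q x = (p x && !(x == a))) :
    (l.filter q).length + 1 = (l.filter p).length := by
  induction l with
  | nil => simp at ha
  | cons b t ih =>
    rcases List.nodup_cons.mp hnd with ⟨hbt, hnt⟩
    rcases List.mem_cons.mp ha with rfl | hat
    · have hqa : q a = false := by rw [hq]; simp
      have hfilt : t.filter q = t.filter p := by
        apply List.filter_congr
        intro x hx
        have hxa : (x == a) = false := beq_eq_false_iff_ne.mpr (by rintro rfl; exact hbt hx)
        rw [hq, hxa]
        simp
      simp [List.filter_cons, hqa, hp, hfilt]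
    · by_cases hpb : p b = true
      · have hqb : q b = true := by
          rw [hq, hpb]
          have hba : (b == a) = false := beq_eq_false_iff_ne.mpr (by rintro rfl; exact hbt hat)
          simp [hba]
        rw [List.filter_cons, List.filter_cons, hqb, hpb]
        simp only [if_true, List.length_cons]
        have := ih hnt hat
        omega
      · have hpb' : p b = false := by simpa using hpb
        have hqb : q b = false := by rw [hq, hpb']; simp
        rw [List.filter_cons, List.filter_cons, hqb, hpb']
        simp only [Bool.false_eq_true, if_false]
        exact ih hnt hat


theorem pv_future_nil (ds : List (String × String)) (g : Nat) : pvFuture ds g [] = [] := by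
  cases g <;> simp [pvFuture]

theorem pv_stab (ds : List (String × String)) (hnd : (pvKeys ds).Nodup) :
    ∀ (g₁ g₂ : Nat) (m : Int) (F : List String), 1 ≤ m →
      (∀ x ∈ F, pvD ds x = some m) →
      (ds.length : Int) < m + (g₁ : Int) → (ds.length : Int) < m + (g₂ : Int) →
      pvFuture ds g₁ F = pvFuture ds g₂ F := by
  intro g₁
  induction g₁ with
  | zero =>
    intro g₂ m F h1 hF hb1 hb2
    have hFnil : F = [] := by
      cases F with
      | nil => rfl
      | cons a t =>
        have := pv_d_le ds a m (hF a (by simp))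
        simp at hb1
        omega
    subst hFnil
    rw [pv_future_nil, pv_future_nil]
  | succ g ih =>
    intro g₂ m F h1 hF hb1 hb2
    by_cases hFnil : F = []
    · subst hFnil
      rw [pv_future_nil, pv_future_nil]
    · obtain ⟨a, ha⟩ := List.exists_mem_of_ne_nil F hFnil
      have hmn : m ≤ (ds.length : Int) := pv_d_le ds a m (hF a ha)
      cases g₂ with
      | zero =>
        exfalso
        simp at hb2
        omega
      | succ g₂' =>
        unfold pvFuture
        rw [if_neg hFnil, if_neg hFnil]
        congr 1
        refine ih g₂' (m + 1) (F.flatMap (pvSB ds)) (by omega) ?_ (by push_cast at hb1 ⊢; omega) (by push_cast at hb2 ⊢; omega)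
        intro x hx
        obtain ⟨p, hp, hxp⟩ := List.mem_flatMap.mp hx
        exact pv_sb_d ds hnd p x m (hF p hp) hxp


theorem pv_future_ne_nil (ds : List (String × String)) :
    ∀ g F, ∀ F' ∈ pvFuture ds g F, F' ≠ [] := by
  intro g
  induction g with
  | zero => intro F F' h; simp [pvFuture] at h
  | succ g ih =>
    intro F F' h
    unfold pvFuture at h
    by_cases hF : F = []
    · rw [if_pos hF] at h; simp at h
    · rw [if_neg hF] at h
      rcases List.mem_cons.mp h with rfl | h2
      · exact hF
      · exact ih _ F' h2


theorem pv_main (ds : List (String × String)) (hnd : (pvKeys ds).Nodup) :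
    ∀ (fuel : Nat) (l : Int) (A B : List String) (seen : PySem.Set String)
      (l2c : PySem.Dict Int (List String)),
      1 ≤ l →
      (A ++ B).Nodup →
      (∀ x ∈ A, pvD ds x = some l) →
      (∀ x ∈ B, pvD ds x = some (l + 1)) →
      (∀ x, x ∈ seen ↔ ∃ m, pvD ds x = some m ∧ (m < l ∨ (m = l ∧ x ∉ A))) →
      (∀ x, x ∈ B ↔ ∃ p, altGet ds x = some p ∧ p ≠ "owl:Thing" ∧ pvD ds p = some l ∧ p ∈ seen) →
      ((pvKeys ds).filter (fun x => !seen.contains x)).length < fuel →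
      (A = [] → B = []) →
      bfsA (childrenOfA ds) fuel (A.map (fun c => (c, l)) ++ B.map (fun c => (c, l + 1))) seen l2c
        = pvGroups (A.foldl (fun d c => d.modify l [] (fun v => v ++ [c])) l2c) (l + 1)
            (pvFuture ds (ds.length + 1) (B ++ A.flatMap (pvSB ds))) := by
  intro fuel
  induction fuel with
  | zero =>
    intro l A B seen l2c h1 h2 h3 h4 h5 h6 h7 h8
    exact absurd h7 (by omega)
  | succ f ih =>
    intro l A B seen l2c h1 h2 h3 h4 h5 h6 h7 h8
    cases A with
    | nil =>
      have hB := h8 rfl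
      subst hB
      simp only [List.map_nil, List.nil_append, List.flatMap_nil, List.append_nil, List.foldl_nil]
      rw [pv_future_nil]
      rfl
    | cons a rest =>
      have haD : pvD ds a = some l := h3 a (by simp)
      have haK : a ∈ pvKeys ds := pv_d_keys ds a l haD
      have haA : a ∈ a :: rest := by simp
      have hans : a ∉ seen := by
        intro hmem
        obtain ⟨m, hm, hcase⟩ := (h5 a).mp hmem
        rw [haD] at hm
        have hml : m = l := by injection hm.symm
        subst hml
        rcases hcase with h' | h'
        · omega
        · exact h'.2 haA
      have hansb : seen.contains a = false := by
        cases hc : seen.contains a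
        · rfl
        · exact absurd ((pv_set_contains_iff seen a).mp hc) hans
      -- components of h2
      have hnc := h2
      simp only [List.cons_append, List.nodup_cons, List.mem_append] at hnc
      have haR : a ∉ rest := fun h => hnc.1 (Or.inl h)
      have haB : a ∉ B := fun h => hnc.1 (Or.inr h)
      have hRB : (rest ++ B).Nodup := hnc.2
      -- bucket facts
      have hsbP : ∀ x ∈ pvSB ds a, altGet ds x = some a ∧ a ≠ "owl:Thing" :=
        fun x hx => pv_sb_parent ds hnd a x hx
      have hsbD : ∀ x ∈ pvSB ds a, pvD ds x = some (l + 1) :=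
        fun x hx => pv_sb_d ds hnd a x l haD hx
      have hsbB : ∀ x ∈ pvSB ds a, x ∉ B := by
        intro x hx hxB
        obtain ⟨p, hp1, hp2, hp3, hp4⟩ := (h6 x).mp hxB
        have hpa : p = a := by
          have h' := (hsbP x hx).1
          rw [h'] at hp1
          injection hp1 with h''
          exact h''.symm
        exact hans (hpa ▸ hp4)
      have hsbR : ∀ x ∈ pvSB ds a, x ∉ a :: rest := by
        intro x hx hxr
        have hxl : pvD ds x = some l := h3 x hxr
        rw [hsbD x hx] at hxl
        have : l + 1 = l := by injection hxl
        omega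
      have hND2 : (rest ++ (B ++ pvSB ds a)).Nodup := by
        rw [List.nodup_append] at hRB ⊢
        refine ⟨hRB.1, ?_, ?_⟩
        · rw [List.nodup_append]
          refine ⟨hRB.2.1, pv_sb_nodup ds hnd a, ?_⟩
          intro y hy z hz
          rintro rfl
          exact hsbB y hz hy
        · intro y hy z hz
          rintro rfl
          rcases List.mem_append.mp hz with hz1 | hz2
          · exact hRB.2.2 y hy y hz1 rfl
          · exact hsbR y hz2 (by simp [hy])
      have hmemadd : ∀ x, x ∈ seen.add a ↔ x ∈ seen ∨ x = a :=
        fun x => PySem.Set.mem_add seen a x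
      have hcount : ((pvKeys ds).filter (fun x => !(seen.add a).contains x)).length + 1
          = ((pvKeys ds).filter (fun x => !seen.contains x)).length := by
        refine pv_filt_count (pvKeys ds) _ _ a hnd haK (by rw [hansb]; rfl) ?_
        intro x
        by_cases hxa : x = a
        · subst hxa
          have h1' : (seen.add x).contains x = true :=
            (pv_set_contains_iff _ _).mpr ((hmemadd x).mpr (Or.inr rfl))
          simp [h1']
        · have hxa' : (x == a) = false := beq_eq_false_iff_ne.mpr hxa
          by_cases hxs : x ∈ seen
          · have c1 : seen.contains x = true := (pv_set_contains_iff _ _).mpr hxs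
            have c2 : (seen.add a).contains x = true :=
              (pv_set_contains_iff _ _).mpr ((hmemadd x).mpr (Or.inl hxs))
            show (!(seen.add a).contains x) = (!seen.contains x && !(x == a))
            rw [c1, c2, hxa']
            rfl
          · have c1 : seen.contains x = false := by
              cases hc : seen.contains x
              · rfl
              · exact absurd ((pv_set_contains_iff _ _).mp hc) hxs
            have c2 : (seen.add a).contains x = false := by
              cases hc : (seen.add a).contains x
              · rfl
              · rcases (hmemadd x).mp ((pv_set_contains_iff _ _).mp hc) with h' | h'
                · exact absurd h' hxs
                · exact absurd h' hxa
            show (!(seen.add a).contains x) = (!seen.contains x && !(x == a))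
            rw [c1, c2, hxa']
            rfl
      -- unfold one bfs step
      have hq : ((a :: rest).map (fun c => (c, l)) ++ B.map (fun c => (c, l + 1)))
          = (a, l) :: (rest.map (fun c => (c, l)) ++ B.map (fun c => (c, l + 1))) := by simp
      rw [hq, bfsA, if_neg (by rw [hansb]; simp)]
      have hsb_eq : PySem.List.sorted ((childrenOfA ds).getD a []) (fun x => x) = pvSB ds a := rfl
      rw [hsb_eq]
      cases rest with
      | nil =>
        by_cases hA' : B ++ pvSB ds a = []
        · have hBnil : B = [] := by
            cases B with
            | nil => rfl
            | cons b bs => simp at hA'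
          have hsbnil : pvSB ds a = [] := by
            cases hB2 : pvSB ds a with
            | nil => rfl
            | cons y ys => rw [hBnil, hB2] at hA'; simp at hA'
          subst hBnil
          simp only [List.map_nil, List.nil_append, hsbnil, List.append_nil]
          rw [show bfsA (childrenOfA ds) f [] (seen.add a) (l2c.modify l [] (fun v => v ++ [a])) = l2c.modify l [] (fun v => v ++ [a]) from by cases f <;> rfl]
          simp only [List.flatMap_cons, List.flatMap_nil, hsbnil, List.append_nil, List.nil_append]
          rw [pv_future_nil]
          rfl
        · have h3' : ∀ x ∈ B ++ pvSB ds a, pvD ds x = some (l + 1) := by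
            intro x hx
            rcases List.mem_append.mp hx with hx1 | hx2
            · exact h4 x hx1
            · exact hsbD x hx2
          have h5'' : ∀ x, x ∈ seen.add a ↔
              ∃ m, pvD ds x = some m ∧ (m < l + 1 ∨ (m = l + 1 ∧ x ∉ B ++ pvSB ds a)) := by
            intro x
            rw [hmemadd x]
            constructor
            · rintro (hx | rfl)
              · obtain ⟨m, hm, hcase⟩ := (h5 x).mp hx
                refine ⟨m, hm, Or.inl ?_⟩
                rcases hcase with h' | h'
                · omega
                · omega
              · exact ⟨l, haD, Or.inl (by omega)⟩
            · rintro ⟨m, hm, hcase⟩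
              rcases hcase with hml | ⟨hml, hxA'⟩
              · by_cases hmltl : m < l
                · exact Or.inl ((h5 x).mpr ⟨m, hm, Or.inl hmltl⟩)
                · have hmeq : m = l := by omega
                  subst hmeq
                  by_cases hxa : x = a
                  · exact Or.inr hxa
                  · refine Or.inl ((h5 x).mpr ⟨m, hm, Or.inr ⟨rfl, ?_⟩⟩)
                    simp [hxa]
              · exfalso
                subst hml
                obtain ⟨p, hp1, hp2, hp3⟩ := (pv_d_succ ds x (l + 1)).mp ⟨hm, by omega⟩
                have hp3' : pvD ds p = some l := by simpa using hp3
                by_cases hps : p ∈ seen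
                · exact hxA' (List.mem_append.mpr (Or.inl ((h6 x).mpr ⟨p, hp1, hp2, hp3', hps⟩)))
                · have hpa : p = a := by
                    by_contra hpa
                    exact hps ((h5 p).mpr ⟨l, hp3', Or.inr ⟨rfl, by simp [hpa]⟩⟩)
                  subst hpa
                  exact hxA' (List.mem_append.mpr (Or.inr
                    ((pv_mem_sb ds p x).mpr ⟨pv_g_mem ds x p hp1, hp2⟩)))
          have h6'' : ∀ x, x ∈ ([] : List String) ↔
              ∃ p, altGet ds x = some p ∧ p ≠ "owl:Thing" ∧ pvD ds p = some (l + 1) ∧ p ∈ seen.add a := by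
            intro x
            simp only [List.not_mem_nil, false_iff]
            rintro ⟨p, hp1, hp2, hp3, hp4⟩
            rcases (hmemadd p).mp hp4 with hps | rfl
            · obtain ⟨m, hm, hcase⟩ := (h5 p).mp hps
              rw [hp3] at hm
              have : l + 1 = m := by injection hm
              rcases hcase with h' | h' <;> omega
            · rw [haD] at hp3
              have : l = l + 1 := by injection hp3
              omega
          have h7'' : ((pvKeys ds).filter (fun x => !(seen.add a).contains x)).length < f := by omega
          have ihx := ih (l + 1) (B ++ pvSB ds a) [] (seen.add a)
            (l2c.modify l [] (fun v => v ++ [a])) (by omega)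
            (by simpa using hND2) h3' (by simp) h5'' h6'' h7'' (fun h => rfl)
          simp only [List.map_nil, List.nil_append, List.append_nil, List.map_append] at ihx ⊢
          rw [ihx]
          -- RHS identity
          simp only [List.flatMap_cons, List.flatMap_nil, List.append_nil, List.nil_append, List.foldl_cons, List.foldl_nil]
          have hfut : pvFuture ds (ds.length + 1) (B ++ pvSB ds a)
              = (B ++ pvSB ds a) :: pvFuture ds ds.length ((B ++ pvSB ds a).flatMap (pvSB ds)) := by
            rw [pvFuture]
            rw [if_neg hA']
          rw [hfut]
          have hstab : pvFuture ds ds.length ((B ++ pvSB ds a).flatMap (pvSB ds))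
              = pvFuture ds (ds.length + 1) ((B ++ pvSB ds a).flatMap (pvSB ds)) := by
            refine pv_stab ds hnd ds.length (ds.length + 1) (l + 1 + 1) _ (by omega) ?_ (by push_cast; omega) (by push_cast; omega)
            intro x hx
            obtain ⟨p, hp, hxp⟩ := List.mem_flatMap.mp hx
            have hpd : pvD ds p = some (l + 1) := h3' p hp
            exact pv_sb_d ds hnd p x (l + 1) hpd hxp
          rw [show pvGroups (l2c.modify l [] (fun v => v ++ [a])) (l + 1)
                ((B ++ pvSB ds a) :: pvFuture ds ds.length ((B ++ pvSB ds a).flatMap (pvSB ds)))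
              = pvGroups ((B ++ pvSB ds a).foldl (fun d c => d.modify (l + 1) [] (fun v => v ++ [c]))
                  (l2c.modify l [] (fun v => v ++ [a]))) (l + 1 + 1)
                  (pvFuture ds ds.length ((B ++ pvSB ds a).flatMap (pvSB ds))) from rfl]
          rw [hstab]
      | cons r rs =>
        have h3' : ∀ x ∈ r :: rs, pvD ds x = some l := fun x hx => h3 x (by simp [hx])
        have h4' : ∀ x ∈ B ++ pvSB ds a, pvD ds x = some (l + 1) := by
          intro x hx
          rcases List.mem_append.mp hx with hx1 | hx2
          · exact h4 x hx1
          · exact hsbD x hx2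
        have h5' : ∀ x, x ∈ seen.add a ↔
            ∃ m, pvD ds x = some m ∧ (m < l ∨ (m = l ∧ x ∉ r :: rs)) := by
          intro x
          rw [hmemadd x]
          constructor
          · rintro (hx | rfl)
            · obtain ⟨m, hm, hcase⟩ := (h5 x).mp hx
              refine ⟨m, hm, ?_⟩
              rcases hcase with h' | h'
              · exact Or.inl h'
              · exact Or.inr ⟨h'.1, fun hh => h'.2 (by simp [hh])⟩
            · exact ⟨l, haD, Or.inr ⟨rfl, haR⟩⟩
          · rintro ⟨m, hm, hcase⟩
            rcases hcase with hml | ⟨hml, hxA⟩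
            · exact Or.inl ((h5 x).mpr ⟨m, hm, Or.inl hml⟩)
            · subst hml
              by_cases hxa : x = a
              · exact Or.inr hxa
              · refine Or.inl ((h5 x).mpr ⟨m, hm, Or.inr ⟨rfl, ?_⟩⟩)
                intro hc
                rcases List.mem_cons.mp hc with rfl | hc2
                · exact hxa rfl
                · exact hxA hc2
        have h6' : ∀ x, x ∈ B ++ pvSB ds a ↔
            ∃ p, altGet ds x = some p ∧ p ≠ "owl:Thing" ∧ pvD ds p = some l ∧ p ∈ seen.add a := by
          intro x
          constructor
          · intro hx
            rcases List.mem_append.mp hx with hx1 | hx2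
            · obtain ⟨p, hp1, hp2, hp3, hp4⟩ := (h6 x).mp hx1
              exact ⟨p, hp1, hp2, hp3, (hmemadd p).mpr (Or.inl hp4)⟩
            · exact ⟨a, (hsbP x hx2).1, (hsbP x hx2).2, haD, (hmemadd a).mpr (Or.inr rfl)⟩
          · rintro ⟨p, hp1, hp2, hp3, hp4⟩
            rcases (hmemadd p).mp hp4 with hps | rfl
            · exact List.mem_append.mpr (Or.inl ((h6 x).mpr ⟨p, hp1, hp2, hp3, hps⟩))
            · exact List.mem_append.mpr (Or.inr ((pv_mem_sb ds p x).mpr ⟨pv_g_mem ds x p hp1, hp2⟩))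
        have h7' : ((pvKeys ds).filter (fun x => !(seen.add a).contains x)).length < f := by omega
        have ihx := ih l (r :: rs) (B ++ pvSB ds a) (seen.add a)
          (l2c.modify l [] (fun v => v ++ [a])) h1
          (by simpa using hND2) h3' h4' h5' h6' h7' (fun h => by simp at h)
        have hqueue : (r :: rs).map (fun c => (c, l)) ++ B.map (fun c => (c, l + 1))
              ++ (pvSB ds a).map (fun ch => (ch, l + 1))
            = (r :: rs).map (fun c => (c, l)) ++ (B ++ pvSB ds a).map (fun c => (c, l + 1)) := by
          simp [List.map_append]
        rw [show ((r :: rs).map (fun c => (c, l)) ++ B.map (fun c => (c, l + 1)))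
              ++ (pvSB ds a).map (fun ch => (ch, l + 1))
            = (r :: rs).map (fun c => (c, l)) ++ (B ++ pvSB ds a).map (fun c => (c, l + 1)) from by
          simp [List.map_append]]
        rw [ihx]
        simp only [List.foldl_cons, List.flatMap_cons, List.append_assoc]


theorem pv_foldg2 (l : Int) :
    ∀ (F : List String) (pre : List (Int × List String)) (cur : List String),
      (∀ q ∈ pre, ¬(q.1 = l)) →
      F.foldl (fun d c => d.modify l [] (fun v => v ++ [c])) (PySem.Dict.mk (pre ++ [(l, cur)]))
        = PySem.Dict.mk (pre ++ [(l, cur ++ F)]) := by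
  intro F
  induction F with
  | nil => intro pre cur h; simp
  | cons c t ih =>
    intro pre cur h
    rw [List.foldl_cons]
    have hfind : List.find? (fun p => p.1 == l) (pre ++ [(l, cur)]) = some (l, cur) := by
      rw [List.find?_append]
      have : List.find? (fun p : Int × List String => p.1 == l) pre = none := by
        rw [List.find?_eq_none]
        intro q hq
        simpa using h q hq
      rw [this]
      simp
    have hcont : (PySem.Dict.mk (pre ++ [(l, cur)])).contains l = true := by
      unfold PySem.Dict.contains
      simp
    have hstep : (PySem.Dict.mk (pre ++ [(l, cur)])).modify l [] (fun v => v ++ [c])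
        = PySem.Dict.mk (pre ++ [(l, cur ++ [c])]) := by
      unfold PySem.Dict.modify PySem.Dict.insert PySem.Dict.getD PySem.Dict.get?
      rw [if_pos hcont]
      apply PySem.Dict.ext
      show (pre ++ [(l, cur)]).map _ = _
      rw [List.map_append]
      have hpre : pre.map (fun p => if p.1 == l then (l, (Option.map (fun x => x.2) (List.find? (fun p => p.1 == l) (PySem.Dict.mk (pre ++ [(l, cur)])).items)).getD [] ++ [c]) else p) = pre := by
        conv_rhs => rw [← List.map_id pre]
        apply List.map_congr_left
        intro q hq
        have : (q.1 == l) = false := beq_eq_false_iff_ne.mpr (h q hq)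
        simp [this]
      rw [hpre]
      show _ ++ [(l, cur)].map _ = _
      have : (PySem.Dict.mk (pre ++ [(l, cur)])).items = pre ++ [(l, cur)] := rfl
      simp [this, hfind]
    rw [hstep]
    have := ih pre (cur ++ [c]) h
    rw [this]
    simp


theorem pv_foldg (l : Int) (F : List String) (acc : PySem.Dict Int (List String))
    (hc : acc.contains l = false) (hF : F ≠ []) :
    F.foldl (fun d c => d.modify l [] (fun v => v ++ [c])) acc
      = PySem.Dict.mk (acc.items ++ [(l, F)]) := by
  cases F with
  | nil => exact absurd rfl hF
  | cons c t =>
    rw [List.foldl_cons]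
    have hstep : acc.modify l [] (fun v => v ++ [c]) = PySem.Dict.mk (acc.items ++ [(l, [c])]) := by
      unfold PySem.Dict.modify
      rw [PySem.Dict.getD_of_not_contains acc [] hc]
      apply PySem.Dict.ext
      rw [PySem.Dict.items_insert_of_not_contains acc _ hc]
      simp
    rw [hstep]
    have hpre : ∀ q ∈ acc.items, ¬(q.1 = l) := by
      intro q hq hql
      have : l ∈ acc.keys := by
        rw [show acc.keys = acc.items.map (fun x => x.1) from rfl]
        exact List.mem_map.mpr ⟨q, hq, hql⟩
      rw [← PySem.Dict.contains_iff_mem_keys] at this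
      rw [this] at hc
      simp at hc
    rw [pv_foldg2 l t acc.items [c] hpre]
    simp


theorem pv_gai :
    ∀ (Fs : List (List String)) (acc : PySem.Dict Int (List String)) (l : Int),
      (∀ F ∈ Fs, F ≠ []) →
      (∀ d : Int, acc.contains d = true → d < l) →
      (pvGroups acc l Fs).items = acc.items ++ pvLevelItems l Fs := by
  intro Fs
  induction Fs with
  | nil => intro acc l _ _; simp [pvGroups, pvLevelItems]
  | cons F Fs ih =>
    intro acc l hne hlt
    have hF : F ≠ [] := hne F (by simp)
    have hcl : acc.contains l = false := by
      cases hcc : acc.contains l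
      · rfl
      · exact absurd (hlt l hcc) (lt_irrefl l)
    show (pvGroups (F.foldl (fun d c => d.modify l [] (fun v => v ++ [c])) acc) (l+1) Fs).items = _
    rw [pv_foldg l F acc hcl hF]
    rw [ih (PySem.Dict.mk (acc.items ++ [(l, F)])) (l + 1) (fun F' h => hne F' (by simp [h])) ?_]
    · show (acc.items ++ [(l, F)]) ++ pvLevelItems (l + 1) Fs = acc.items ++ pvLevelItems l (F :: Fs)
      rw [List.append_assoc]
      rfl
    · intro d hd
      rw [PySem.Dict.contains_iff_mem_keys, PySem.Dict.keys_mk] at hd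
      rw [List.map_append] at hd
      rcases List.mem_append.mp hd with h1 | h2
      · have : acc.contains d = true := by
          rw [PySem.Dict.contains_iff_mem_keys]
          exact h1
        have := hlt d this
        omega
      · simp at h2
        omega


theorem pv_fl1 (ds : List (String × String)) (hnd : (pvKeys ds).Nodup) :
    ∀ (g : Nat) (m : Int) (F : List String), 1 ≤ m → F.Nodup →
      (∀ x, x ∈ F ↔ x ∈ pvLvl ds m) →
      (ds.length : Int) < m + (g : Int) →
      ((pvLevelItems m (pvFuture ds g F)).map (fun p => (p.1, PySem.List.sorted p.2 (fun x => x)))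
          = (List.range (pvFuture ds g F).length).map
              (fun i : Nat => (m + (i : Int), PySem.List.sorted (pvLvl ds (m + (i : Int))) (fun x => x))))
      ∧ (∀ d : Int, m ≤ d → ((∃ c, c ∈ pvLvl ds d) ↔ d < m + ((pvFuture ds g F).length : Int))) := by
  intro g
  induction g with
  | zero =>
    intro m F h1 hFnd hmem hb
    simp only [Nat.cast_zero, add_zero] at hb
    have hF : F = [] := by
      cases F with
      | nil => rfl
      | cons a t =>
        have hda := (pv_mem_lvl ds m a).mp ((hmem a).mp (by simp))
        have := pv_d_le ds a m hda
        omega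
    subst hF
    refine ⟨by simp [pvFuture, pvLevelItems], ?_⟩
    intro d hd
    constructor
    · rintro ⟨c, hc⟩
      have hdc := (pv_mem_lvl ds d c).mp hc
      have := pv_d_le ds c d hdc
      omega
    · intro hlt
      exfalso
      simp [pvFuture] at hlt
      omega
  | succ g ih =>
    intro m F h1 hFnd hmem hb
    by_cases hF : F = []
    · subst hF
      rw [pv_future_nil]
      have hLm : pvLvl ds m = [] := by
        rw [List.eq_nil_iff_forall_not_mem]
        intro x hx
        simpa using (hmem x).mpr hx
      refine ⟨by simp [pvLevelItems], ?_⟩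
      intro d hd
      constructor
      · rintro ⟨c, hc⟩
        rw [pv_lvl_empty_ge ds m h1 hLm d hd] at hc
        simp at hc
      · intro hlt
        exfalso
        simp only [List.length_nil, Nat.cast_zero, add_zero] at hlt
        omega
    · have hstep : pvFuture ds (g + 1) F = F :: pvFuture ds g (F.flatMap (pvSB ds)) := by
        rw [pvFuture]
        rw [if_neg hF]
      obtain ⟨a, ha⟩ := List.exists_mem_of_ne_nil F hF
      have hmn : m ≤ (ds.length : Int) := pv_d_le ds a m ((pv_mem_lvl ds m a).mp ((hmem a).mp ha))
      have hmem' : ∀ x, x ∈ F.flatMap (pvSB ds) ↔ x ∈ pvLvl ds (m + 1) := by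
        intro x
        rw [List.mem_flatMap, pv_lvl_succ ds hnd m h1 x]
        constructor
        · rintro ⟨p, hp, hxp⟩; exact ⟨p, (hmem p).mp hp, hxp⟩
        · rintro ⟨p, hp, hxp⟩; exact ⟨p, (hmem p).mpr hp, hxp⟩
      obtain ⟨ih1, ih2⟩ := ih (m + 1) (F.flatMap (pvSB ds)) (by omega)
        (pv_flat_nodup ds hnd F hFnd) hmem' (by push_cast at hb ⊢; omega)
      rw [hstep]
      have hperm : F.Perm (pvLvl ds m) := by
        classical
        refine List.perm_of_nodup_nodup_toFinset_eq hFnd (pv_lvl_nodup ds hnd m) ?_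
        ext x
        simp only [List.mem_toFinset]
        exact hmem x
      have hsF : PySem.List.sorted F (fun x => x) = PySem.List.sorted (pvLvl ds m) (fun x => x) :=
        PySem.List.sorted_eq_sorted_of_perm _ _ _ (fun a b h => h) hperm
      constructor
      · simp only [pvLevelItems, List.map_cons, List.length_cons]
        rw [List.range_succ_eq_map]
        simp only [List.map_cons, List.map_map]
        congr 1
        · simp [hsF]
        · rw [ih1]
          apply List.map_congr_left
          intro i _
          have hc1 : m + ((i : Int) + 1) = (m + 1) + (i : Int) := by ring
          simp only [Function.comp]
          have : ((Nat.succ i : ℕ) : Int) = (i : Int) + 1 := by push_cast; ring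
          rw [this, hc1]
      · intro d hd
        by_cases hdm : d = m
        · subst hdm
          constructor
          · intro _
            simp only [List.length_cons]
            push_cast
            omega
          · intro _
            exact ⟨a, (hmem a).mp ha⟩
        · have hd1 : m + 1 ≤ d := by omega
          rw [ih2 d hd1]
          simp only [List.length_cons]
          push_cast
          omega


-- ===== VERDICT (by name: the statement is the Claim_ definition above) =====
theorem build_layer_map_py_spec : Claim_equal_build_layer_map_py := by
  intro ds hdom hpre
  show build_layer_map_py ds = build_layer_map_py_alt ds
  have hnd : (pvKeys ds).Nodup := hpre
  have hroots_nd : (rootsA ds).Nodup := pv_roots_nodup ds hnd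
  have hroots_mem : ∀ x, x ∈ rootsA ds ↔ x ∈ pvLvl ds 1 := fun x => pv_roots_lvl ds hnd x
  have h5₀ : ∀ x, x ∈ (PySem.Set.empty : PySem.Set String) ↔
      ∃ m, pvD ds x = some m ∧ (m < 1 ∨ (m = 1 ∧ x ∉ rootsA ds)) := by
    intro x
    constructor
    · intro hx
      exact absurd hx (by simp [PySem.Set.empty])
    · rintro ⟨m, hm, hcase⟩
      exfalso
      have hm1 : 1 ≤ m := pv_d_pos ds x m hm
      rcases hcase with h' | ⟨h1, h2⟩
      · omega
      · subst h1
        exact h2 ((hroots_mem x).mpr ((pv_mem_lvl ds 1 x).mpr hm))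
  have h6₀ : ∀ x, x ∈ ([] : List String) ↔
      ∃ p, altGet ds x = some p ∧ p ≠ "owl:Thing" ∧ pvD ds p = some 1 ∧ p ∈ (PySem.Set.empty : PySem.Set String) := by
    intro x
    simp [PySem.Set.empty]
  have h7₀ : ((pvKeys ds).filter (fun x => !(PySem.Set.empty : PySem.Set String).contains x)).length
      < 2 * ds.length + 1 := by
    have hfe : ((pvKeys ds).filter (fun x => !(PySem.Set.empty : PySem.Set String).contains x)) = pvKeys ds :=
      List.filter_eq_self.mpr (fun a _ => rfl)
    rw [hfe]
    simp only [pvKeys, List.length_map]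
    omega
  have hbfs := pv_main ds hnd (2 * ds.length + 1) 1 (rootsA ds) [] PySem.Set.empty PySem.Dict.empty
    le_rfl (by simpa using hroots_nd)
    (fun x hx => (pv_mem_lvl ds 1 x).mp ((hroots_mem x).mp hx))
    (by simp) h5₀ h6₀ h7₀ (fun _ => rfl)
  have hA : build_layer_map_py ds
      = (pvLevelItems 1 (pvFuture ds (ds.length + 1 + 1) (rootsA ds))).map
          (fun p => (p.1, PySem.List.sorted p.2 (fun x => x))) := by
    unfold build_layer_map_py
    rw [show (rootsA ds).map (fun r => (r, (1 : Int)))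
        = (rootsA ds).map (fun c => (c, (1 : Int))) ++ ([] : List String).map (fun c => (c, (1 : Int) + 1)) from by simp]
    rw [hbfs]
    simp only [List.map_nil, List.nil_append, List.flatMap_nil]
    by_cases hroots : rootsA ds = []
    · rw [hroots]
      simp only [List.foldl_nil, List.flatMap_nil, List.nil_append]
      rw [pv_future_nil, pv_future_nil]
      simp [pvGroups, pvLevelItems]
      rfl
    · have hfs : pvFuture ds (ds.length + 1 + 1) (rootsA ds)
          = rootsA ds :: pvFuture ds (ds.length + 1) ((rootsA ds).flatMap (pvSB ds)) := by
        rw [pvFuture]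
        rw [if_neg hroots]
      rw [hfs]
      have hce : (PySem.Dict.empty : PySem.Dict Int (List String)).contains 1 = false := rfl
      rw [pv_foldg 1 (rootsA ds) PySem.Dict.empty hce hroots]
      rw [pv_gai _ _ _ (pv_future_ne_nil ds _ _) ?_]
      · show ((PySem.Dict.empty : PySem.Dict Int (List String)).items ++ [((1 : Int), rootsA ds)]
            ++ pvLevelItems (1 + 1) _).map _ = _
        rw [show (PySem.Dict.empty : PySem.Dict Int (List String)).items = [] from rfl]
        simp [pvLevelItems]
      · intro d hd
        rw [PySem.Dict.contains_iff_mem_keys, PySem.Dict.keys_mk] at hd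
        rw [show (PySem.Dict.empty : PySem.Dict Int (List String)).items = [] from rfl] at hd
        simp at hd
        omega
  obtain ⟨hc1, hc2⟩ := pv_fl1 ds hnd (ds.length + 1 + 1) 1 (rootsA ds) le_rfl hroots_nd
    hroots_mem (by push_cast; omega)
  have hB : build_layer_map_py_alt ds
      = (PySem.List.sorted (PySem.Set.ofList ((pvKeys ds).filterMap (pvD ds))) (fun x => x)).map
          (fun d => (d, PySem.List.sorted (pvLvl ds d) (fun x => x))) := rfl
  have hM : ∀ d : Int, d ∈ PySem.Set.ofList ((pvKeys ds).filterMap (pvD ds)) ↔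
      (1 ≤ d ∧ d < 1 + ((pvFuture ds (ds.length + 1 + 1) (rootsA ds)).length : Int)) := by
    intro d
    rw [PySem.Set.mem_ofList, List.mem_filterMap]
    constructor
    · rintro ⟨c, hck, hcd⟩
      have hd1 : 1 ≤ d := pv_d_pos ds c d hcd
      refine ⟨hd1, ?_⟩
      exact (hc2 d hd1).mp ⟨c, (pv_mem_lvl ds d c).mpr hcd⟩
    · rintro ⟨hd1, hdM⟩
      obtain ⟨c, hc⟩ := (hc2 d hd1).mpr hdM
      exact ⟨c, pv_d_keys ds c d ((pv_mem_lvl ds d c).mp hc), (pv_mem_lvl ds d c).mp hc⟩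
  have hLayers : PySem.List.sorted (PySem.Set.ofList ((pvKeys ds).filterMap (pvD ds))) (fun x => x)
      = (List.range (pvFuture ds (ds.length + 1 + 1) (rootsA ds)).length).map
          (fun i : Nat => (1 + (i : Int))) := by
    apply PySem.List.sorted_eq_of_perm_of_pairwise_lt
    · classical
      refine List.perm_of_nodup_nodup_toFinset_eq ?_ (PySem.Set.nodup_ofList _) ?_
      · refine List.Nodup.map ?_ List.nodup_range
        intro i j hij
        simp only at hij
        omega
      · ext d
        simp only [List.mem_toFinset, List.mem_map, List.mem_range]
        rw [hM d]
        constructor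
        · rintro ⟨i, hi, rfl⟩
          constructor
          · omega
          · push_cast
            omega
        · rintro ⟨hd1, hdM⟩
          refine ⟨(d - 1).toNat, ?_, ?_⟩
          · omega
          · omega
    · refine (List.pairwise_map).mpr ?_
      refine List.Pairwise.imp ?_ List.pairwise_lt_range
      intro i j hij
      push_cast
      omega
  rw [hA, hc1, hB, hLayers, List.map_map]
  rfl
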